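-- pv_equiv track=rewrite | github.com/elsevier-mintzasp/system_input_preprocessing | extraction.py | remove_paragraphs_after_id
-- ===== SOURCE A (Python) =====
-- def remove_paragraphs_after_id(data, target_id):
--     """
--     Remove all paragraphs after the one with the specified id.
--
--     Args:
--         data (dict): Dictionary containing 'paragraphs_to_review' list
--         target_id (str): The id to match
--
--     Returns:
--         dict: Modified dictionary with paragraphs after target_id removed
--     """
--     if "paragraphs_to_review" not in data:
--         return data
--
--     paragraphs = data["paragraphs_to_review"]
--
--     # Find the index of the paragraph with target_id
--     target_index = None
--     for i, paragraph in enumerate(paragraphs):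
--         if paragraph.get("id") == target_id:
--             target_index = i
--             break
--
--     # If target_id not found, return original data
--     if target_index is None:
--         return data
--
--     # Keep only paragraphs up to and including the target
--     data["paragraphs_to_review"] = paragraphs[: target_index + 1]
--
--     return data
-- ===== SOURCE B (Python) =====
-- def remove_paragraphs_after_id(data, target_id):
--     if "paragraphs_to_review" not in data:
--         return data
--     kept = []
--     for paragraph in data["paragraphs_to_review"]:
--         kept.append(paragraph)
--         if paragraph.get("id") == target_id:
--             data["paragraphs_to_review"] = kept
--             return data
--     return data
-- ===== Notes on version B (the rewrite author's own statement) =====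
-- stated objective: simpler
-- what changed: Single accumulating pass that collects paragraphs and returns as soon as the target id is seen, replacing the two-phase locate-index-then-slice structure.
import Mathlib
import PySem

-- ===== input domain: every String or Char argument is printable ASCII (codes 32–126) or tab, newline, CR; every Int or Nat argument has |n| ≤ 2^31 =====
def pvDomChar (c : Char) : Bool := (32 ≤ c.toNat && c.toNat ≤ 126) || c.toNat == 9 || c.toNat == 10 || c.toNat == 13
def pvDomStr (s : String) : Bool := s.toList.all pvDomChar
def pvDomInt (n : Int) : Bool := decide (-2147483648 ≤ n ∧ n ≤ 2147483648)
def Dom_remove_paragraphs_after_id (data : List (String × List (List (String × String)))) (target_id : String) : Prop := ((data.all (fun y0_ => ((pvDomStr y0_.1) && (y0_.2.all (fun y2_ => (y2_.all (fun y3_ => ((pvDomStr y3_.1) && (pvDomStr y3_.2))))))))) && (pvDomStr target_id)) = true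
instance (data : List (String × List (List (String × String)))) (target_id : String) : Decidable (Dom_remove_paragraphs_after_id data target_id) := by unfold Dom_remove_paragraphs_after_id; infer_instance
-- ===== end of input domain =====

-- B replaces A's locate-index-then-slice structure by a single accumulating pass (objective: simpler).
-- A mutates its argument in place (reassigns data["paragraphs_to_review"]); B performs the same mutation;
-- the equivalence proved here is about the return value.

-- ===== PORT A =====
-- the 'for i, paragraph in enumerate(paragraphs): … break' search for the first matching id
def pvAFindIdx (target_id : String) : List (List (String × String)) → Nat → Option Nat
  | [], _ => none
  | p :: rest, i =>
      if ((PySem.Dict.mk p).get? "id" == some target_id) then some i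
      else pvAFindIdx target_id rest (i + 1)

def remove_paragraphs_after_id (data : List (String × List (List (String × String)))) (target_id : String) : List (String × List (List (String × String))) :=
  let d := PySem.Dict.mk data
  if d.contains "paragraphs_to_review" = false then data
  else
    let paragraphs := (d.get? "paragraphs_to_review").getD []
    match pvAFindIdx target_id paragraphs 0 with
    | none => data
    | some target_index =>
        (d.insert "paragraphs_to_review"
          (PySem.List.slice paragraphs none (some ((target_index : Int) + 1)))).items

-- ===== PORT B =====
-- the accumulating loop: append each paragraph to kept; on a match, reassign and return at once
def pvBLoop (d : PySem.Dict String (List (List (String × String)))) (data : List (String × List (List (String × String)))) (target_id : String) (kept : List (List (String × String))) : List (List (String × String)) → List (String × List (List (String × String)))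
  | [] => data
  | p :: rest =>
      let kept' := kept ++ [p]
      if ((PySem.Dict.mk p).get? "id" == some target_id) then
        (d.insert "paragraphs_to_review" kept').items
      else pvBLoop d data target_id kept' rest

def remove_paragraphs_after_id_alt (data : List (String × List (List (String × String)))) (target_id : String) : List (String × List (List (String × String))) :=
  let d := PySem.Dict.mk data
  if d.contains "paragraphs_to_review" = false then data
  else pvBLoop d data target_id [] ((d.get? "paragraphs_to_review").getD [])

-- ===== PRECONDITION & SPEC =====
def Spec_remove_paragraphs_after_id (data : List (String × List (List (String × String)))) (target_id : String) (out : List (String × List (List (String × String)))) : Prop := out = remove_paragraphs_after_id_alt data target_id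
instance (data : List (String × List (List (String × String)))) (target_id : String) (out : List (String × List (List (String × String)))) : Decidable (Spec_remove_paragraphs_after_id data target_id out) := by unfold Spec_remove_paragraphs_after_id; infer_instance

-- ===== CLAIM (what is proved, stated in full; the proofs are below) =====
def Claim_equal_remove_paragraphs_after_id : Prop := ∀ (data : List (String × List (List (String × String)))) (target_id : String), Dom_remove_paragraphs_after_id data target_id → Spec_remove_paragraphs_after_id data target_id (remove_paragraphs_after_id data target_id)

-- ===== LEMMAS AND PROOFS =====

-- indices produced by pvAFindIdx started at n are ≥ n
theorem pvAFindIdx_ge (target_id : String) (ps : List (List (String × String))) (n i : Nat)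
    (h : pvAFindIdx target_id ps n = some i) : n ≤ i := by
  induction ps generalizing n with
  | nil => simp [pvAFindIdx] at h
  | cons p rest ih =>
      unfold pvAFindIdx at h
      split at h
      · simp only [Option.some.injEq] at h; omega
      · have := ih (n + 1) h; omega

-- the loop of B computes exactly what A's find-then-take computes
theorem pvBLoop_eq (d : PySem.Dict String (List (List (String × String)))) (data : List (String × List (List (String × String)))) (target_id : String)
    (ps : List (List (String × String))) (kept : List (List (String × String))) (n : Nat) :
    pvBLoop d data target_id kept ps =
      match pvAFindIdx target_id ps n with
      | none => data
      | some i => (d.insert "paragraphs_to_review" (kept ++ ps.take (i + 1 - n))).items := by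
  induction ps generalizing kept n with
  | nil => simp [pvBLoop, pvAFindIdx]
  | cons p rest ih =>
      unfold pvBLoop pvAFindIdx
      split
      · simp
      · rw [ih (kept ++ [p]) (n + 1)]
        cases h : pvAFindIdx target_id rest (n + 1) with
        | none => rfl
        | some i =>
            have hge := pvAFindIdx_ge target_id rest (n + 1) i h
            have : i + 1 - n = (i - n) + 1 := by omega
            have h2 : i + 1 - (n + 1) = i - n := by omega
            simp only [this, h2, List.take_succ_cons, List.append_assoc, List.singleton_append]

-- ===== VERDICT (by name: the statement is the Claim_ definition above) =====
theorem remove_paragraphs_after_id_spec : Claim_equal_remove_paragraphs_after_id := by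
  intro data target_id _
  unfold Spec_remove_paragraphs_after_id remove_paragraphs_after_id remove_paragraphs_after_id_alt
  simp only []
  split
  · rfl
  · rw [pvBLoop_eq (PySem.Dict.mk data) data target_id _ [] 0]
    cases h : pvAFindIdx target_id (((PySem.Dict.mk data).get? "paragraphs_to_review").getD []) 0 with
    | none => rfl
    | some i =>
        have : ((i : Int) + 1) = ((i + 1 : Nat) : Int) := by push_cast; ring
        dsimp only
        rw [this, PySem.List.slice_to_natCast]
        simp
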